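-- pv_equiv track=rewrite | github.com/ksaubhri12/ds_algo | geeksForGeeks/dataStructure/array/rearrangement/doubleElementAndMoveToZero.py | pushZeroToEndWithModification
-- ===== SOURCE A (Python) =====
-- def pushZeroToEndWithModification(arr):
--     n = len(arr)
--     if n == 1:
--         return arr
--     for i in range(n-1):
--         if arr[i] != 0 and arr[i] == arr[i+1]:
--             arr[i] = 2*arr[i+1]
--             arr[i+1] = 0
--
--     count = 0
--     for i in range(n):
--         if arr[i] != 0:
--             arr[count],arr[i] = arr[i],arr[count]
--             count = count + 1
--     return arr
-- ===== SOURCE B (Python) =====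
-- def pushZeroToEndWithModification(arr):
--     # Single fused pass with a pending element: merge adjacent equal values and
--     # route each finished value to the nonzero output or the zero counter at once.
--     # Mutates the same list object via slice assignment, like A.
--     nz = []
--     zeros = 0
--     have = False
--     p = 0
--     for x in arr:
--         if not have:
--             p, have = x, True
--         elif p != 0 and p == x:
--             nz.append(2 * p)
--             p = 0
--         elif p != 0:
--             nz.append(p)
--             p = x
--         else:
--             zeros += 1
--             p = x
--     if have:
--         if p != 0:
--             nz.append(p)
--         else:
--             zeros += 1
--     arr[:] = nz + [0] * zeros
--     return arr
-- ===== Notes on version B (the rewrite author's own statement) =====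
-- stated objective: alternative
-- what changed: A's two staged index loops (in-place adjacent doubling, then a two-pointer swap compaction) are replaced by one fused value pass with a pending-element accumulator that merges adjacent equal values and routes each finished value to a nonzero output list or a zero counter immediately, then writes the result back with slice assignment.
import Mathlib
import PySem

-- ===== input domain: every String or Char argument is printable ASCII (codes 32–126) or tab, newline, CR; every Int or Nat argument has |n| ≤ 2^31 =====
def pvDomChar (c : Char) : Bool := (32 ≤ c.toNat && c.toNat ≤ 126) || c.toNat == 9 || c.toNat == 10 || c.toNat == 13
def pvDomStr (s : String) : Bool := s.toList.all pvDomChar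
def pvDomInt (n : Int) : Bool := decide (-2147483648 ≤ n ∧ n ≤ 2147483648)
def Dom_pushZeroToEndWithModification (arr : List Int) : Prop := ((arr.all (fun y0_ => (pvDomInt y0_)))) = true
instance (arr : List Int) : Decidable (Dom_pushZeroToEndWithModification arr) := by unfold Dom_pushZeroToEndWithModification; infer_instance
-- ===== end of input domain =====

-- B replaces A's two staged index loops (in-place adjacent doubling, then two-pointer swap compaction) by ONE fused
-- value pass with a pending-element accumulator that merges adjacent equal values and routes each finished value to a
-- nonzero output list or a zero counter at once. Python A and B mutate the argument list in place; the equivalence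
-- proved here is about the RETURN value (B's slice assignment mutates the same object, like A).

-- ===== PORT A =====
-- body of A's first loop: 'if arr[i] != 0 and arr[i] == arr[i+1]: arr[i] = 2*arr[i+1]; arr[i+1] = 0'
def pvDStep (a : List Int) (i : Int) : List Int :=
  if PySem.List.pyGetD a i 0 ≠ 0 ∧ PySem.List.pyGetD a i 0 = PySem.List.pyGetD a (i+1) 0 then
    PySem.List.pySetD (PySem.List.pySetD a i (2 * PySem.List.pyGetD a (i+1) 0)) (i+1) 0
  else a

def pvDoublePass (arr : List Int) : List Int :=
  (PySem.List.pyRange 0 ((arr.length : Int) - 1) 1).foldl pvDStep arr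

-- body of A's second loop: 'if arr[i] != 0: arr[count],arr[i] = arr[i],arr[count]; count = count + 1'
def pvStep (st : List Int × Int) (i : Int) : List Int × Int :=
  if PySem.List.pyGetD st.1 i 0 ≠ 0 then
    (PySem.List.pySetD (PySem.List.pySetD st.1 st.2 (PySem.List.pyGetD st.1 i 0)) i
       (PySem.List.pyGetD st.1 st.2 0), st.2 + 1)
  else st

def pushZeroToEndWithModification (arr : List Int) : List Int :=
  let n : Int := arr.length
  if n = 1 then arr
  else
    let a1 := pvDoublePass arr
    let st := (PySem.List.pyRange 0 n 1).foldl pvStep (a1, 0)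
    st.1

-- ===== PORT B =====
-- loop body of B's single 'for x in arr' pass over state (nz, zeros, pending)
def pvBStep (s : List Int × Nat × Option Int) (x : Int) : List Int × Nat × Option Int :=
  match s with
  | (nz, z, none) => (nz, z, some x)
  | (nz, z, some p) =>
    if p ≠ 0 ∧ p = x then (nz ++ [2 * p], z, some 0)
    else if p ≠ 0 then (nz ++ [p], z, some x)
    else (nz, z + 1, some x)

-- B's epilogue: flush the pending element, then 'arr[:] = nz + [0] * zeros'
def pvBFin (s : List Int × Nat × Option Int) : List Int :=
  match s with
  | (nz, z, none) => nz ++ List.replicate z 0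
  | (nz, z, some p) =>
    if p ≠ 0 then (nz ++ [p]) ++ List.replicate z 0 else nz ++ List.replicate (z + 1) 0

def pushZeroToEndWithModification_alt (arr : List Int) : List Int :=
  pvBFin (arr.foldl pvBStep ([], 0, none))

-- ===== PRECONDITION & SPEC =====
def Spec_pushZeroToEndWithModification (arr : List Int) (out : List Int) : Prop := out = pushZeroToEndWithModification_alt arr
instance (arr : List Int) (out : List Int) : Decidable (Spec_pushZeroToEndWithModification arr out) := by unfold Spec_pushZeroToEndWithModification; infer_instance

-- ===== CLAIM (what is proved, stated in full; the proofs are below) =====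
def Claim_equal_pushZeroToEndWithModification : Prop := ∀ (arr : List Int), Dom_pushZeroToEndWithModification arr → Spec_pushZeroToEndWithModification arr (pushZeroToEndWithModification arr)

-- ===== LEMMAS AND PROOFS =====

-- the common mathematical object: the left-to-right adjacent-equal merge
def pvMerge : List Int → List Int
  | [] => []
  | [x] => [x]
  | x :: y :: rest =>
      if x ≠ 0 ∧ x = y then 2 * x :: pvMerge (0 :: rest) else x :: pvMerge (y :: rest)
termination_by l => l.length

theorem pv_set_at {α : Type} (pre : List α) (x v : α) (suf : List α) :
    (pre ++ x :: suf).set pre.length v = pre ++ v :: suf := by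
  induction pre with
  | nil => simp
  | cons h t ih => simp [ih]

theorem pv_set_at' {α : Type} (pre : List α) (x v : α) (suf : List α) (n : Nat) (hn : n = pre.length) :
    (pre ++ x :: suf).set n v = pre ++ v :: suf := by
  subst hn; exact pv_set_at pre x v suf

theorem pv_get_at (pre : List Int) (x : Int) (suf : List Int) :
    PySem.List.pyGetD (pre ++ x :: suf) ((pre.length : Int)) 0 = x := by
  simp

theorem pv_get_at' (pre : List Int) (x : Int) (suf : List Int) (i : Int) (hi : i = (pre.length : Int)) :
    PySem.List.pyGetD (pre ++ x :: suf) i 0 = x := by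
  subst hi; exact pv_get_at pre x suf

-- A's first loop computes the merge: after processing positions < |M| the array is M ++ p :: ys with M final
theorem pvDPassGen : ∀ (ys M : List Int) (p : Int),
    (PySem.List.pyRange (M.length : Int) ((M.length : Int) + (ys.length : Int)) 1).foldl pvDStep (M ++ p :: ys)
      = M ++ pvMerge (p :: ys) := by
  intro ys
  induction ys with
  | nil =>
      intro M p
      rw [PySem.List.pyRange_one_eq_nil (by simp)]
      simp [pvMerge]
  | cons y rest ih =>
      intro M p
      have hcons : PySem.List.pyRange (M.length : Int) ((M.length : Int) + ((y :: rest).length : Int)) 1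
          = (M.length : Int) :: PySem.List.pyRange ((M.length : Int) + 1) ((M.length : Int) + ((y :: rest).length : Int)) 1 :=
        PySem.List.pyRange_one_cons (by simp only [List.length_cons]; push_cast; omega)
      rw [hcons, List.foldl_cons]
      have hgp : PySem.List.pyGetD (M ++ p :: y :: rest) ((M.length : Int)) 0 = p := pv_get_at M p _
      have hgy : PySem.List.pyGetD (M ++ p :: y :: rest) ((M.length : Int) + 1) 0 = y := by
        rw [show M ++ p :: y :: rest = (M ++ [p]) ++ y :: rest from by simp]
        exact pv_get_at' _ _ _ _ (by simp)
      by_cases h : p ≠ 0 ∧ p = y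
      · have hset : pvDStep (M ++ p :: y :: rest) ((M.length : Int))
            = (M ++ [2 * p]) ++ 0 :: rest := by
          unfold pvDStep
          rw [if_pos (by rw [hgp, hgy]; exact ⟨h.1, h.2⟩)]
          rw [hgy, PySem.List.pySetD_natCast]
          rw [pv_set_at' M p (2 * y) (y :: rest) M.length rfl]
          rw [show (M.length : Int) + 1 = (((M ++ [2 * y]).length : Nat) : Int) from by simp]
          rw [PySem.List.pySetD_natCast]
          rw [show M ++ 2 * y :: y :: rest = (M ++ [2 * y]) ++ y :: rest from by simp]
          rw [pv_set_at' (M ++ [2 * y]) y 0 rest _ rfl]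
          rw [h.2]
        rw [hset]
        have := ih (M ++ [2 * p]) 0
        rw [show ((M ++ [2 * p]).length : Int) = (M.length : Int) + 1 from by simp] at this
        rw [show (M.length : Int) + 1 + ((rest).length : Int) = (M.length : Int) + (((y :: rest)).length : Int) from by simp only [List.length_cons]; push_cast; ring] at this
        rw [this]
        rw [show pvMerge (p :: y :: rest) = 2 * p :: pvMerge (0 :: rest) from by rw [pvMerge]; exact if_pos h]
        simp
      · have hset : pvDStep (M ++ p :: y :: rest) ((M.length : Int)) = M ++ p :: y :: rest := by
          unfold pvDStep
          rw [if_neg (by rw [hgp, hgy]; exact h)]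
        rw [hset]
        have := ih (M ++ [p]) y
        rw [show ((M ++ [p]).length : Int) = (M.length : Int) + 1 from by simp] at this
        rw [show (M.length : Int) + 1 + ((rest).length : Int) = (M.length : Int) + (((y :: rest)).length : Int) from by simp only [List.length_cons]; push_cast; ring] at this
        rw [show (M ++ [p]) ++ y :: rest = M ++ p :: y :: rest from by simp] at this
        rw [this]
        rw [show pvMerge (p :: y :: rest) = p :: pvMerge (y :: rest) from by rw [pvMerge]; exact if_neg h]
        simp

theorem pvDoublePass_eq_merge (arr : List Int) : pvDoublePass arr = pvMerge arr := by
  cases arr with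
  | nil =>
      unfold pvDoublePass
      rw [PySem.List.pyRange_one_eq_nil (by simp)]
      simp [pvMerge]
  | cons x ys =>
      unfold pvDoublePass
      have := pvDPassGen ys [] x
      simpa [show ((x :: ys).length : Int) - 1 = (0 : Int) + (ys.length : Int) from by simp only [List.length_cons]; push_cast; ring] using this

-- closed form of A's compaction state after the first k iterations
theorem pvCompactInv (a : List Int) : ∀ (k : Nat), k ≤ a.length →
    (PySem.List.pyRange 0 (k : Int) 1).foldl pvStep (a, 0)
      = ((a.take k).filter (fun x => x != 0)
           ++ (List.replicate (k - ((a.take k).filter (fun x => x != 0)).length) 0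
           ++ a.drop k),
         (((a.take k).filter (fun x => x != 0)).length : Int)) := by
  intro k
  induction k with
  | zero => intro _; simp [PySem.List.pyRange_one_eq_nil (le_refl 0)]
  | succ k ih =>
      intro hk1
      have hkl : k < a.length := hk1
      have hk : k ≤ a.length := Nat.le_of_succ_le hk1
      have hr : PySem.List.pyRange 0 ((k + 1 : Nat) : Int) 1
          = PySem.List.pyRange 0 (k : Int) 1 ++ [(k : Int)] := by
        push_cast
        exact PySem.List.pyRange_one_succ_right (by omega)
      have ihh := ih hk
      obtain ⟨f, hf⟩ : ∃ f, List.filter (fun x => x != 0) (List.take k a) = f := ⟨_, rfl⟩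
      obtain ⟨c, hcn⟩ : ∃ c, f.length = c := ⟨_, rfl⟩
      rw [hf, hcn] at ihh
      have hck : c ≤ k := by
        have h1 := List.length_filter_le (fun x => x != 0) (a.take k)
        rw [hf, hcn] at h1
        have h2 : (a.take k).length = k := by rw [List.length_take]; omega
        omega
      have hdrop : a.drop k = a[k] :: a.drop (k + 1) := List.drop_eq_getElem_cons hkl
      have htake : a.take (k + 1) = a.take k ++ [a[k]] := List.take_succ_eq_append_getElem hkl
      rw [hr, List.foldl_append, ihh]
      simp only [List.foldl_cons, List.foldl_nil]
      have hbg : f ++ (List.replicate (k - c) 0 ++ a.drop k)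
          = (f ++ List.replicate (k - c) 0) ++ (a[k] :: a.drop (k + 1)) := by
        rw [hdrop]; simp
      have hgetk : PySem.List.pyGetD (f ++ (List.replicate (k - c) 0 ++ a.drop k)) ((k : Nat) : Int) 0 = a[k] := by
        rw [hbg]
        exact pv_get_at' _ _ _ _ (by simp only [List.length_append, List.length_replicate, hcn]; omega)
      by_cases hx : a[k] = 0
      · -- element is zero: the state is unchanged, one more zero joins the pad
        have hfilt : List.filter (fun x => x != 0) (List.take (k + 1) a) = f := by
          rw [htake, List.filter_append, hf]; simp [hx]
        rw [hfilt, hcn]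
        simp only [pvStep]
        rw [if_neg (by simp [hgetk, hx])]
        refine Prod.ext ?_ rfl
        rw [hdrop, show k + 1 - c = (k - c) + 1 from by omega, List.replicate_succ']
        simp [hx]
      · -- element nonzero: it is swapped to position c
        have hfilt : List.filter (fun x => x != 0) (List.take (k + 1) a) = f ++ [a[k]] := by
          rw [htake, List.filter_append, hf]; simp [hx]
        rw [hfilt]
        simp only [pvStep]
        rw [if_pos (by simp [hgetk, hx])]
        rw [hgetk]
        have hlen2 : (f ++ [a[k]]).length = c + 1 := by
          simp only [List.length_append, List.length_cons, List.length_nil, hcn]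
        rcases Nat.lt_or_ge c k with hlt | hge
        · -- c < k : position c holds a pad zero; it moves to position k
          obtain ⟨m, hm⟩ : ∃ m, k - c = m + 1 := ⟨k - c - 1, by omega⟩
          have hb2 : f ++ (List.replicate (k - c) 0 ++ a.drop k)
              = f ++ 0 :: (List.replicate m 0 ++ (a[k] :: a.drop (k + 1))) := by
            rw [hdrop, hm, List.replicate_succ]; simp
          have hgetc : PySem.List.pyGetD (f ++ (List.replicate (k - c) 0 ++ a.drop k)) ((c : Nat) : Int) 0 = 0 := by
            rw [hb2]
            exact pv_get_at' _ _ _ _ (by rw [hcn])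
          rw [hgetc]
          simp only [PySem.List.pySetD_natCast]
          rw [hb2, pv_set_at' f 0 a[k] _ c hcn.symm]
          rw [show f ++ a[k] :: (List.replicate m 0 ++ (a[k] :: a.drop (k + 1)))
              = (f ++ a[k] :: List.replicate m 0) ++ (a[k] :: a.drop (k + 1)) from by simp]
          rw [pv_set_at' (f ++ a[k] :: List.replicate m 0) a[k] 0 (a.drop (k + 1)) k
              (by simp only [List.length_append, List.length_cons, List.length_replicate, hcn]; omega)]
          rw [hlen2, show k + 1 - (c + 1) = m + 1 from by omega, List.replicate_succ']
          refine Prod.ext ?_ (by push_cast; ring)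
          simp
        · -- c = k : the swap is a no-op and a[k] joins the prefix
          have hek : c = k := le_antisymm hck hge
          have hb2 : f ++ (List.replicate (k - c) 0 ++ a.drop k) = f ++ (a[k] :: a.drop (k + 1)) := by
            rw [hdrop, show k - c = 0 from by omega]; simp
          have hgetc : PySem.List.pyGetD (f ++ (List.replicate (k - c) 0 ++ a.drop k)) ((c : Nat) : Int) 0 = a[k] := by
            rw [hb2]
            exact pv_get_at' _ _ _ _ (by rw [hcn])
          rw [hgetc]
          simp only [PySem.List.pySetD_natCast]
          rw [hb2, pv_set_at' f a[k] a[k] _ c hcn.symm]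
          rw [pv_set_at' f a[k] a[k] _ k (by omega)]
          rw [hlen2, show k + 1 - (c + 1) = 0 from by omega]
          refine Prod.ext ?_ (by push_cast; ring)
          simp

theorem pvCompact (a : List Int) :
    ((PySem.List.pyRange 0 (a.length : Int) 1).foldl pvStep (a, 0)).1
      = a.filter (fun x => x != 0)
          ++ List.replicate (a.length - (a.filter (fun x => x != 0)).length) 0 := by
  have h := pvCompactInv a a.length le_rfl
  simp at h
  simp [h]

-- |filter (≠0)| + |filter (=0)| = length
theorem pvLenSplit (l : List Int) :
    (l.filter (fun x => x != 0)).length + (l.filter (fun x => x == 0)).length = l.length := by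
  induction l with
  | nil => rfl
  | cons x t ih => by_cases hx : x = 0 <;> simp [hx] <;> omega

-- B's fused pass with pending p computes filter/count of the merge
theorem pvBGen : ∀ (ys nz : List Int) (z : Nat) (p : Int),
    pvBFin (ys.foldl pvBStep (nz, z, some p))
      = nz ++ ((pvMerge (p :: ys)).filter (fun x => x != 0)
          ++ List.replicate (z + ((pvMerge (p :: ys)).filter (fun x => x == 0)).length) 0) := by
  intro ys
  induction ys with
  | nil =>
      intro nz z p
      by_cases hp : p = 0 <;> simp [pvBFin, pvMerge, hp]
  | cons x rest ih =>
      intro nz z p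
      rw [List.foldl_cons]
      by_cases h : p ≠ 0 ∧ p = x
      · rw [show pvBStep (nz, z, some p) x = (nz ++ [2 * p], z, some 0) from by
          simp only [pvBStep]; rw [if_pos h]]
        rw [ih]
        rw [show pvMerge (p :: x :: rest) = 2 * p :: pvMerge (0 :: rest) from by
          rw [pvMerge]; exact if_pos h]
        have h2p : ¬ (2 * p = 0) := by
          intro hc; exact h.1 (by omega)
        simp [h2p]
      · rw [show pvMerge (p :: x :: rest) = p :: pvMerge (x :: rest) from by
          rw [pvMerge]; exact if_neg h]
        by_cases hp : p ≠ 0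
        · rw [show pvBStep (nz, z, some p) x = (nz ++ [p], z, some x) from by
            simp only [pvBStep]; rw [if_neg h, if_pos hp]]
          rw [ih]
          simp [hp]
        · have hp0 : p = 0 := by omega
          rw [show pvBStep (nz, z, some p) x = (nz, z + 1, some x) from by
            simp only [pvBStep]; rw [if_neg h, if_neg hp]]
          rw [ih]
          simp [hp0]
          omega

theorem pvMerge_length (l : List Int) : (pvMerge l).length = l.length := by
  induction l using pvMerge.induct with
  | case1 => simp [pvMerge]
  | case2 x => simp [pvMerge]
  | case3 x y rest h ih => rw [pvMerge, if_pos h]; simpa using ih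
  | case4 x y rest h ih => rw [pvMerge, if_neg h]; simpa using ih

theorem pvAlt_closed (arr : List Int) :
    pushZeroToEndWithModification_alt arr
      = (pvMerge arr).filter (fun x => x != 0)
          ++ List.replicate ((pvMerge arr).filter (fun x => x == 0)).length 0 := by
  cases arr with
  | nil => simp [pushZeroToEndWithModification_alt, pvBFin, pvMerge]
  | cons x ys =>
      unfold pushZeroToEndWithModification_alt
      rw [List.foldl_cons, show pvBStep ([], 0, none) x = ([], 0, some x) from rfl]
      rw [pvBGen ys [] 0 x]
      simp

-- ===== VERDICT (by name: the statement is the Claim_ definition above) =====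
theorem pushZeroToEndWithModification_spec : Claim_equal_pushZeroToEndWithModification := by
  intro arr _
  unfold Spec_pushZeroToEndWithModification
  rw [pvAlt_closed]
  unfold pushZeroToEndWithModification
  by_cases h1 : (arr.length : Int) = 1
  · -- a singleton [x]: both sides are [x]
    simp only [h1, if_pos]
    obtain ⟨x, hx⟩ : ∃ x, arr = [x] := by
      cases arr with
      | nil => simp at h1
      | cons a t =>
          cases t with
          | nil => exact ⟨a, rfl⟩
          | cons b t2 => simp at h1; omega
    subst hx
    by_cases hx0 : x = 0 <;> simp [pvMerge, hx0]
  · simp only [h1, if_false]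
    have hlenm : (pvMerge arr).length = arr.length := pvMerge_length arr
    rw [pvDoublePass_eq_merge]
    rw [show (arr.length : Int) = ((pvMerge arr).length : Int) from by rw [hlenm]]
    rw [pvCompact (pvMerge arr)]
    congr 1
    congr 1
    have := pvLenSplit (pvMerge arr)
    omega
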